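-- pv_equiv track=rewrite | github.com/mel-fayne/elira_api | news/getjobs.py | get_job_area
-- ===== SOURCE A (Python) =====
-- JOB_AREAS = {
--     'Data & AI': ['data'],
--     'Software': ['software', 'devops'],
--     'Networking & Cloud': ['network', 'networking', 'cloud'],
--     'Cyber Security': ['cyber', 'security'],
--     'Database': ['database', 'sql'],
--     'Intern': ['intern', 'assistant'],
--     'Developer': ['developer', 'frontend', 'backend', 'stack'],
--     'Design': ['design', 'designer', 'ui/ux', 'ui', 'ux'],
--     'Web Dev': ['web'],
--     'IT & Support': ['support', 'it', 'ict'],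
--     'Sales': ['sales', 'marketing']
-- }
--
-- def get_job_area(title):
--     title = title.replace("-", " ").replace(",", " ").replace("-", " ")
--     keywords = [word for word in title.lower().split()]
--
--     area_matches = []
--     for area, area_keywords in JOB_AREAS.items():
--         for keyword in keywords:
--             if keyword in area_keywords:
--                 if area not in area_matches:
--                     area_matches.append(area)
--
--     return area_matches
-- ===== SOURCE B (Python) =====
-- JOB_AREAS = {
--     'Data & AI': ['data'],
--     'Software': ['software', 'devops'],
--     'Networking & Cloud': ['network', 'networking', 'cloud'],
--     'Cyber Security': ['cyber', 'security'],
--     'Database': ['database', 'sql'],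
--     'Intern': ['intern', 'assistant'],
--     'Developer': ['developer', 'frontend', 'backend', 'stack'],
--     'Design': ['design', 'designer', 'ui/ux', 'ui', 'ux'],
--     'Web Dev': ['web'],
--     'IT & Support': ['support', 'it', 'ict'],
--     'Sales': ['sales', 'marketing']
-- }
--
-- # Reverse index built once: keyword -> list of areas containing it.
-- _KEYWORD_TO_AREAS = {}
-- for _area, _kws in JOB_AREAS.items():
--     for _kw in _kws:
--         _KEYWORD_TO_AREAS[_kw] = _KEYWORD_TO_AREAS.get(_kw, []) + [_area]
--
-- def get_job_area(title):
--     title = title.replace("-", " ").replace(",", " ")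
--     matched = set()
--     for word in title.lower().split():
--         for area in _KEYWORD_TO_AREAS.get(word, []):
--             matched.add(area)
--     return [area for area in JOB_AREAS if area in matched]
-- ===== Notes on version B (the rewrite author's own statement) =====
-- stated objective: idiomatic
-- what changed: Replaces the nested scan over all areas x title words by a precomputed reverse index keyword->areas consulted once per title word, then emits matched areas in JOB_AREAS order.
import Mathlib
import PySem

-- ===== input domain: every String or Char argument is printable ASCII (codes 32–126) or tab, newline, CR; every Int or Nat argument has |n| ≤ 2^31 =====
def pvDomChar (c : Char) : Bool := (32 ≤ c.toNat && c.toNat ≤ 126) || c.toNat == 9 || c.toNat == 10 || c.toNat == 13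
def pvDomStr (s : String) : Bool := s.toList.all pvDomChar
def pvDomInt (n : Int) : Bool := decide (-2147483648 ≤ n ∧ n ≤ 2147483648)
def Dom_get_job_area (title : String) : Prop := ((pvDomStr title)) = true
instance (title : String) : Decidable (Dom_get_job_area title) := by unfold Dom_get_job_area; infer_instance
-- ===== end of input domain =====

-- B replaces A's nested scan (all areas × all title words) by a precomputed reverse index
-- keyword→areas looked up once per word, emitting matches in JOB_AREAS order (objective: idiomatic).

-- ===== PORT A =====
def JOB_AREAS : List (String × List String) := [
  ("Data & AI", ["data"]),
  ("Software", ["software", "devops"]),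
  ("Networking & Cloud", ["network", "networking", "cloud"]),
  ("Cyber Security", ["cyber", "security"]),
  ("Database", ["database", "sql"]),
  ("Intern", ["intern", "assistant"]),
  ("Developer", ["developer", "frontend", "backend", "stack"]),
  ("Design", ["design", "designer", "ui/ux", "ui", "ux"]),
  ("Web Dev", ["web"]),
  ("IT & Support", ["support", "it", "ict"]),
  ("Sales", ["sales", "marketing"])]

def get_job_area (title : String) : List String :=
  let t := PySem.Str.replace (PySem.Str.replace (PySem.Str.replace title "-" " ") "," " ") "-" " "
  let keywords := (PySem.Str.split₀ (PySem.Str.lower t)).map (fun word => word)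
  JOB_AREAS.foldl (fun area_matches p =>
    keywords.foldl (fun am keyword =>
      if keyword ∈ p.2 then (if p.1 ∉ am then am ++ [p.1] else am) else am) area_matches) []

-- ===== PORT B =====
-- reverse index built once at module level in Source B: keyword -> areas containing it
def KEYWORD_TO_AREAS : PySem.Dict String (List String) :=
  JOB_AREAS.foldl (fun d p =>
    p.2.foldl (fun d kw => d.insert kw (d.getD kw [] ++ [p.1])) d) PySem.Dict.empty

def get_job_area_alt (title : String) : List String :=
  let t := PySem.Str.replace (PySem.Str.replace title "-" " ") "," " "
  let matched : PySem.Set String :=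
    (PySem.Str.split₀ (PySem.Str.lower t)).foldl
      (fun s word => (KEYWORD_TO_AREAS.getD word []).foldl PySem.Set.add s) PySem.Set.empty
  (JOB_AREAS.map (fun p => p.1)).filter (fun area => PySem.Set.contains matched area)

-- ===== PRECONDITION & SPEC =====
def Spec_get_job_area (title : String) (out : List String) : Prop := out = get_job_area_alt title
instance (title : String) (out : List String) : Decidable (Spec_get_job_area title out) := by unfold Spec_get_job_area; infer_instance

-- ===== CLAIM (what is proved, stated in full; the proofs are below) =====
def Claim_equal_get_job_area : Prop := ∀ (title : String), Dom_get_job_area title → Spec_get_job_area title (get_job_area title)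

-- ===== LEMMAS AND PROOFS =====

-- single-character replace is a character map
lemma go_single (o n : Char) : ∀ (l acc : List Char) (fuel : Nat), l.length ≤ fuel →
    PySem.Chars.replace.go [o] [n] fuel l acc
      = acc.reverse ++ l.map (fun c => if c = o then n else c) := by
  intro l
  induction l with
  | nil => intro acc fuel _; cases fuel <;> simp [PySem.Chars.replace.go]
  | cons c t ih =>
    intro acc fuel hf
    cases fuel with
    | zero => simp at hf
    | succ f =>
      simp only [List.length_cons, Nat.succ_le_succ_iff] at hf
      by_cases hc : c = o
      · subst hc
        have hpre : List.isPrefixOf [c] (c :: t) = true := by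
          simp [List.isPrefixOf]
        simp only [PySem.Chars.replace.go, hpre, if_pos]
        rw [show List.drop [c].length (c :: t) = t from rfl]
        rw [ih (List.reverse [n] ++ acc) f hf]
        simp
      · have hpre : List.isPrefixOf [o] (c :: t) = false := by
          simp [List.isPrefixOf]; exact fun h => absurd h.symm hc
        simp only [PySem.Chars.replace.go, hpre, Bool.false_eq_true, if_false]
        rw [ih (c :: acc) f hf]
        simp [hc]

lemma replace_single (o n : Char) (cs : List Char) :
    PySem.Chars.replace cs [o] [n] = cs.map (fun c => if c = o then n else c) := by
  have : PySem.Chars.replace cs [o] [n] = PySem.Chars.replace.go [o] [n] cs.length cs [] := by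
    simp [PySem.Chars.replace]
  rw [this, go_single o n cs [] cs.length (le_refl _)]
  simp

-- A's redundant third replace("-", " ") is the identity on its argument
lemma third_replace_id (title : String) :
    PySem.Str.replace (PySem.Str.replace (PySem.Str.replace title "-" " ") "," " ") "-" " "
      = PySem.Str.replace (PySem.Str.replace title "-" " ") "," " " := by
  apply String.toList_inj.mp
  rw [PySem.Str.toList_replace]
  have h1 : ("-" : String).toList = ['-'] := rfl
  have h2 : (" " : String).toList = [' '] := rfl
  have h3 : ("," : String).toList = [','] := rfl
  rw [h1, h2, replace_single]
  set y := (PySem.Str.replace (PySem.Str.replace title "-" " ") "," " ").toList with hy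
  have hnod : ∀ c ∈ y, c ≠ '-' := by
    intro c hc
    rw [hy, PySem.Str.toList_replace, h3, h2, replace_single,
        PySem.Str.toList_replace, h1, h2, replace_single] at hc
    simp only [List.map_map, List.mem_map] at hc
    obtain ⟨x, _, hx⟩ := hc
    subst hx
    simp only [Function.comp]
    split_ifs <;> simp_all
  calc y.map (fun c => if c = '-' then ' ' else c)
      = y.map id := List.map_congr_left (by intro c hc; simp [hnod c hc])
    _ = y := List.map_id y

-- A's inner loop over the words, characterised
lemma innerA (area : String) (kws : List String) :
    ∀ (words : List String) (acc : List String),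
    words.foldl (fun am w => if w ∈ kws then (if area ∉ am then am ++ [area] else am) else am) acc
      = if (∃ w ∈ words, w ∈ kws) ∧ area ∉ acc then acc ++ [area] else acc := by
  intro words
  induction words with
  | nil => intro acc; simp
  | cons w ws ih =>
    intro acc
    simp only [List.foldl_cons]
    by_cases hw : w ∈ kws
    · by_cases ha : area ∈ acc
      · rw [if_pos hw, if_neg (by simp [ha]), ih]
        simp [ha]
      · rw [if_pos hw, if_pos ha, ih]
        rw [if_neg (by simp), if_pos ⟨⟨w, by simp, hw⟩, ha⟩]
    · rw [if_neg hw, ih]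
      have : (∃ x ∈ w :: ws, x ∈ kws) ↔ (∃ x ∈ ws, x ∈ kws) := by
        simp [hw]
      by_cases hx : (∃ x ∈ ws, x ∈ kws) ∧ area ∉ acc
      · rw [if_pos hx, if_pos (by rw [this]; exact hx)]
      · rw [if_neg hx, if_neg (by rw [this]; exact hx)]

-- A's outer loop over the areas, characterised
lemma outerA (words : List String) :
    ∀ (items : List (String × List String)) (acc : List String),
    (∀ p ∈ items, p.1 ∉ acc) → (items.map Prod.fst).Nodup →
    items.foldl (fun area_matches p =>
      words.foldl (fun am keyword =>
        if keyword ∈ p.2 then (if p.1 ∉ am then am ++ [p.1] else am) else am) area_matches) acc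
      = acc ++ (items.filter (fun p => decide (∃ w ∈ words, w ∈ p.2))).map Prod.fst := by
  intro items
  induction items with
  | nil => intro acc _ _; simp
  | cons p items ih =>
    intro acc hacc hnod
    simp only [List.foldl_cons]
    rw [innerA]
    have hp : p.1 ∉ acc := hacc p (by simp)
    rw [List.map_cons, List.nodup_cons] at hnod
    by_cases hhit : ∃ w ∈ words, w ∈ p.2
    · rw [if_pos ⟨hhit, hp⟩]
      rw [ih (acc ++ [p.1])
        (by intro q hq
            simp only [List.mem_append, List.mem_singleton]
            rintro (h | h)
            · exact hacc q (by simp [hq]) h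
            · exact hnod.1 (h ▸ List.mem_map_of_mem (f := Prod.fst) hq))
        hnod.2]
      simp [hhit]
    · rw [if_neg (by simp [hhit])]
      rw [ih acc (fun q hq => hacc q (by simp [hq])) hnod.2]
      simp [hhit]

-- membership in the reverse index: one area's keyword list
lemma revInner (a : String) : ∀ (kws : List String) (d : PySem.Dict String (List String))
    (w area : String),
    area ∈ (kws.foldl (fun d kw => d.insert kw (d.getD kw [] ++ [a])) d).getD w []
      ↔ area ∈ d.getD w [] ∨ (a = area ∧ w ∈ kws) := by
  intro kws
  induction kws with
  | nil => intro d w area; simp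
  | cons kw rest ih =>
    intro d w area
    simp only [List.foldl_cons]
    rw [ih, PySem.Dict.getD_insert]
    by_cases hw : w = kw
    · subst hw
      rw [if_pos rfl]
      constructor
      · rintro (h | h)
        · rcases List.mem_append.mp h with h | h
          · exact Or.inl h
          · exact Or.inr ⟨(List.mem_singleton.mp h).symm, by simp⟩
        · exact Or.inr ⟨h.1, List.mem_cons_of_mem _ h.2⟩
      · rintro (h | ⟨ha, hmem⟩)
        · exact Or.inl (List.mem_append_left _ h)
        · rcases List.mem_cons.mp hmem with _ | h
          · exact Or.inl (List.mem_append_right _ (by simp [ha.symm]))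
          · exact Or.inr ⟨ha, h⟩
    · rw [if_neg hw]
      constructor
      · rintro (h | ⟨ha, h⟩)
        · exact Or.inl h
        · exact Or.inr ⟨ha, List.mem_cons_of_mem _ h⟩
      · rintro (h | ⟨ha, h⟩)
        · exact Or.inl h
        · rcases List.mem_cons.mp h with h | h
          · exact absurd h hw
          · exact Or.inr ⟨ha, h⟩

-- membership in the full reverse index
lemma revAll : ∀ (items : List (String × List String)) (d : PySem.Dict String (List String))
    (w area : String),
    area ∈ (items.foldl (fun d p => p.2.foldl (fun d kw => d.insert kw (d.getD kw [] ++ [p.1])) d) d).getD w []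
      ↔ area ∈ d.getD w [] ∨ ∃ p ∈ items, p.1 = area ∧ w ∈ p.2 := by
  intro items
  induction items with
  | nil => intro d w area; simp
  | cons p items ih =>
    intro d w area
    simp only [List.foldl_cons]
    rw [ih, revInner]
    simp only [List.mem_cons]
    constructor
    · rintro ((h | h) | ⟨q, hq, h⟩)
      · exact Or.inl h
      · exact Or.inr ⟨p, Or.inl rfl, h⟩
      · exact Or.inr ⟨q, Or.inr hq, h⟩
    · rintro (h | ⟨q, hq | hq, h⟩)
      · exact Or.inl (Or.inl h)
      · exact Or.inl (Or.inr (by rw [← hq]; exact h))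
      · exact Or.inr ⟨q, hq, h⟩

lemma mem_rev (w area : String) :
    area ∈ KEYWORD_TO_AREAS.getD w [] ↔ ∃ p ∈ JOB_AREAS, p.1 = area ∧ w ∈ p.2 := by
  unfold KEYWORD_TO_AREAS
  rw [revAll]
  simp [PySem.Dict.getD_empty]

-- membership in B's matched set
lemma matchedB : ∀ (words : List String) (s : PySem.Set String) (area : String),
    area ∈ words.foldl (fun s word => (KEYWORD_TO_AREAS.getD word []).foldl PySem.Set.add s) s
      ↔ area ∈ s ∨ ∃ w ∈ words, area ∈ KEYWORD_TO_AREAS.getD w [] := by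
  intro words
  induction words with
  | nil => intro s area; simp
  | cons w ws ih =>
    intro s area
    simp only [List.foldl_cons]
    rw [ih]
    rw [show (KEYWORD_TO_AREAS.getD w []).foldl PySem.Set.add s
          = PySem.Set.update s (KEYWORD_TO_AREAS.getD w []) from rfl]
    rw [PySem.Set.mem_update]
    constructor
    · rintro ((h | h) | ⟨x, hx, h⟩)
      · exact Or.inl h
      · exact Or.inr ⟨w, by simp, h⟩
      · exact Or.inr ⟨x, List.mem_cons_of_mem _ hx, h⟩
    · rintro (h | ⟨x, hx, h⟩)
      · exact Or.inl (Or.inl h)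
      · rcases List.mem_cons.mp hx with hx | hx
        · exact Or.inl (Or.inr (hx ▸ h))
        · exact Or.inr ⟨x, hx, h⟩

lemma keys_nodup : (JOB_AREAS.map Prod.fst).Nodup := by decide

-- ===== VERDICT (by name: the statement is the Claim_ definition above) =====
set_option maxHeartbeats 800000 in
theorem get_job_area_spec : Claim_equal_get_job_area := by
  intro title _
  unfold Spec_get_job_area
  simp only [get_job_area, get_job_area_alt]
  rw [third_replace_id]
  set words := PySem.Str.split₀
    (PySem.Str.lower (PySem.Str.replace (PySem.Str.replace title "-" " ") "," " ")) with hw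
  rw [show words.map (fun word => word) = words from List.map_id' words]
  rw [outerA words JOB_AREAS [] (by simp) keys_nodup]
  rw [List.filter_map]
  rw [List.nil_append]
  have hfc : ∀ p ∈ JOB_AREAS,
      (fun p : String × List String => decide (∃ w ∈ words, w ∈ p.2)) p
        = ((fun area => PySem.Set.contains
            (words.foldl (fun s word => (KEYWORD_TO_AREAS.getD word []).foldl PySem.Set.add s)
              PySem.Set.empty) area) ∘ (fun p : String × List String => p.1)) p := by
    intro p hp
    have hm : p.1 ∈ words.foldl
        (fun s word => (KEYWORD_TO_AREAS.getD word []).foldl PySem.Set.add s) PySem.Set.empty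
        ↔ ∃ w ∈ words, w ∈ p.2 := by
      rw [matchedB]
      constructor
      · rintro (h | ⟨w, hmem, h⟩)
        · exact absurd h (by simp [PySem.Set.empty])
        · obtain ⟨q, hq, hq1, hwq⟩ := (mem_rev w p.1).mp h
          have : q = p := List.inj_on_of_nodup_map keys_nodup hq hp hq1
          exact ⟨w, hmem, this ▸ hwq⟩
      · rintro ⟨w, hmem, h⟩
        exact Or.inr ⟨w, hmem, (mem_rev w p.1).mpr ⟨p, hp, rfl, h⟩⟩
    rw [Bool.eq_iff_iff]
    simp only [Function.comp_apply, PySem.Set.contains, List.contains_iff_mem, decide_eq_true_eq]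
    exact hm.symm
  rw [List.filter_congr hfc]
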